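-- pv_equiv track=rewrite | github.com/mateozorzi/TDA | EjRepaso/dyc/alteranados.py | alternar
-- ===== SOURCE A (Python) =====
-- def alternar(arr): # [0,2,1,3]
--     if len(arr) <= 2:
--         return arr
--
--     #separo el arreglo a la mitad
--     mitad = len(arr) // 2
--     primera_mitad = arr[:mitad] #[0,2]
--     segunda_mitad = arr[mitad:] #[1,3]
--
--     alternado_izq = primera_mitad[:len(primera_mitad)//2] + segunda_mitad[:len(segunda_mitad)//2]
--     alternado_der = primera_mitad[len(primera_mitad)//2:] + segunda_mitad[len(segunda_mitad)//2:]
--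
--     # alternado_izq = [0,1]
--     alternado_izq = alternar(alternado_izq)
--     #alternado_der = [2,3]
--     alternado_der = alternar(alternado_der)
--
--     return alternado_izq + alternado_der
-- ===== SOURCE B (Python) =====
-- def alternar(arr):
--     if len(arr) <= 2:
--         return arr
--     out = []
--     stack = [arr]
--     while stack:
--         node = stack.pop()
--         if len(node) <= 2:
--             out += node
--             continue
--         mitad = len(node) // 2
--         first = node[:mitad]
--         second = node[mitad:]
--         left = first[:len(first)//2] + second[:len(second)//2]
--         right = first[len(first)//2:] + second[len(second)//2:]
--         stack.append(right)
--         stack.append(left)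
--     return out
-- ===== Notes on version B (the rewrite author's own statement) =====
-- stated objective: alternative
-- what changed: Replaces the two-way recursion with an iterative explicit-stack traversal that pushes the right piece then the left piece and appends base-case pieces to an output accumulator left-to-right.
import Mathlib
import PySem

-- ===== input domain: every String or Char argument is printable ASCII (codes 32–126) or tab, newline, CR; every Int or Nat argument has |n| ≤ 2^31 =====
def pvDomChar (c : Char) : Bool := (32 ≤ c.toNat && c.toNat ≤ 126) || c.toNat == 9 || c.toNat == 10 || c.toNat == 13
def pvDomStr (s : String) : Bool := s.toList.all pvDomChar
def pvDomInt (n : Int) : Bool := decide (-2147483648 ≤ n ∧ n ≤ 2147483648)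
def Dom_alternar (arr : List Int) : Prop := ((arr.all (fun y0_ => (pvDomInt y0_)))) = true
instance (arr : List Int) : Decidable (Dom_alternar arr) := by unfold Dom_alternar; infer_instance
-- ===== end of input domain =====

-- B replaces A's two-way recursion by an iterative explicit-stack traversal with an output accumulator (alternative decomposition, same cost); return value proved equal on all inputs.


-- ===== PORT A =====
-- literal port of A: recursive split at len//2, interleave halves' halves, recurse, concatenate.
-- `fuel` is only a structural totality guard; fuel = arr.length always suffices (each recursive
-- call strictly shrinks the list), so the 0-fuel arm is never the computed answer.
def alternarF : Nat → List Int → List Int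
  | 0, arr => arr
  | fuel + 1, arr =>
    if arr.length ≤ 2 then arr
    else
      let mitad := arr.length / 2
      let primera := arr.take mitad      -- arr[:mitad] (bounds are in range: take/drop are exact)
      let segunda := arr.drop mitad      -- arr[mitad:]
      let izq := primera.take (primera.length / 2) ++ segunda.take (segunda.length / 2)
      let der := primera.drop (primera.length / 2) ++ segunda.drop (segunda.length / 2)
      alternarF fuel izq ++ alternarF fuel der

def alternar (arr : List Int) : List Int := alternarF arr.length arr

-- ===== PORT B =====
-- the while-loop of Source B: pop a node; small nodes are appended to out, big ones are split and the
-- two pieces pushed (left piece on top).  `fuel` is only a structural totality guard; the sum of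
-- 2^length over the stack strictly decreases each iteration, so fuel = 2^arr.length suffices.
def altLoopF : Nat → List (List Int) → List Int → List Int
  | _, [], out => out
  | 0, _ :: _, out => out
  | fuel + 1, node :: rest, out =>
    if node.length ≤ 2 then altLoopF fuel rest (out ++ node)
    else
      let mitad := node.length / 2
      let first := node.take mitad
      let second := node.drop mitad
      let left := first.take (first.length / 2) ++ second.take (second.length / 2)
      let right := first.drop (first.length / 2) ++ second.drop (second.length / 2)
      altLoopF fuel (left :: right :: rest) out

def alternar_alt (arr : List Int) : List Int :=
  if arr.length ≤ 2 then arr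
  else altLoopF (2 ^ arr.length) [arr] []

-- ===== PRECONDITION & SPEC =====
def Spec_alternar (arr : List Int) (out : List Int) : Prop := out = alternar_alt arr
instance (arr : List Int) (out : List Int) : Decidable (Spec_alternar arr out) := by unfold Spec_alternar; infer_instance

-- ===== CLAIM (what is proved, stated in full; the proofs are below) =====
def Claim_equal_alternar : Prop := ∀ (arr : List Int), Dom_alternar arr → Spec_alternar arr (alternar arr)

-- ===== LEMMAS AND PROOFS =====
-- the lengths of the two pieces A splits a big list into
theorem split_lens (arr : List Int) :
    ((arr.take (arr.length / 2)).take ((arr.take (arr.length / 2)).length / 2) ++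
      (arr.drop (arr.length / 2)).take ((arr.drop (arr.length / 2)).length / 2)).length
      = arr.length / 2 / 2 + (arr.length - arr.length / 2) / 2 ∧
    ((arr.take (arr.length / 2)).drop ((arr.take (arr.length / 2)).length / 2) ++
      (arr.drop (arr.length / 2)).drop ((arr.drop (arr.length / 2)).length / 2)).length
      = (arr.length / 2 - arr.length / 2 / 2) +
        ((arr.length - arr.length / 2) - (arr.length - arr.length / 2) / 2) := by
  constructor <;>
    (simp only [List.length_append, List.length_take, List.length_drop]; omega)

-- the fuel is irrelevant once it covers the list's length
theorem altF_irrel (f1 : Nat) : ∀ (f2 : Nat) (arr : List Int),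
    arr.length ≤ f1 → arr.length ≤ f2 → alternarF f1 arr = alternarF f2 arr := by
  induction f1 with
  | zero =>
    intro f2 arr h1 _
    have : arr = [] := List.length_eq_zero_iff.mp (by omega)
    subst this
    cases f2 <;> simp [alternarF]
  | succ f1 ih =>
    intro f2 arr h1 h2
    cases f2 with
    | zero =>
      have : arr = [] := List.length_eq_zero_iff.mp (by omega)
      subst this
      simp [alternarF]
    | succ f2 =>
      simp only [alternarF]
      by_cases hs : arr.length ≤ 2
      · simp [hs]
      · simp only [if_neg hs]
        obtain ⟨e1, e2⟩ := split_lens arr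
        rw [ih f2 _ (by rw [e1]; omega) (by rw [e1]; omega),
            ih f2 _ (by rw [e2]; omega) (by rw [e2]; omega)]

theorem alternar_small (node : List Int) (h : node.length ≤ 2) : alternar node = node := by
  match node with
  | [] => rfl
  | [a] => rfl
  | [a, b] => rfl
  | a :: b :: c :: t => simp at h

-- unfolding A once on a big list: alternar node = alternar left ++ alternar right
theorem alternar_split (node : List Int) (h : ¬ node.length ≤ 2) :
    alternar node =
      alternar ((node.take (node.length / 2)).take ((node.take (node.length / 2)).length / 2) ++
                (node.drop (node.length / 2)).take ((node.drop (node.length / 2)).length / 2)) ++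
      alternar ((node.take (node.length / 2)).drop ((node.take (node.length / 2)).length / 2) ++
                (node.drop (node.length / 2)).drop ((node.drop (node.length / 2)).length / 2)) := by
  obtain ⟨e1, e2⟩ := split_lens node
  obtain ⟨k, hk⟩ : ∃ k, node.length = k + 1 := ⟨node.length - 1, by omega⟩
  show alternarF node.length node = _
  conv_lhs => rw [hk]
  simp only [alternarF, if_neg h]
  unfold alternar
  rw [altF_irrel k _ _ (by rw [e1]; omega) (le_refl _),
      altF_irrel k _ _ (by rw [e2]; omega) (le_refl _)]

-- loop invariant: with enough fuel the loop returns out ++ alternar of each stacked node, top first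
theorem altLoopF_inv (fuel : Nat) : ∀ (stack : List (List Int)) (out : List Int),
    (stack.map (fun l => 2 ^ l.length)).sum ≤ fuel →
    altLoopF fuel stack out = out ++ (stack.map alternar).flatten := by
  induction fuel with
  | zero =>
    intro stack out hs
    cases stack with
    | nil => simp [altLoopF]
    | cons node rest =>
      exfalso
      have := Nat.two_pow_pos node.length
      simp only [List.map_cons, List.sum_cons] at hs
      omega
  | succ fuel ih =>
    intro stack out hs
    cases stack with
    | nil => simp [altLoopF]
    | cons node rest =>
      simp only [List.map_cons, List.sum_cons] at hs
      have hpos := Nat.two_pow_pos node.length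
      simp only [altLoopF]
      by_cases h : node.length ≤ 2
      · rw [if_pos h, ih rest _ (by omega)]
        simp [alternar_small node h]
      · rw [if_neg h]
        obtain ⟨e1, e2⟩ := split_lens node
        -- the two pieces cost strictly less fuel: 2^a + 2^b < 2^(a+b) for a,b ≥ 1, a+b ≥ 3
        have key : ∀ a b : ℕ, 1 ≤ a → 1 ≤ b → 3 ≤ a + b → 2 ^ a + 2 ^ b < 2 ^ (a + b) := by
          intro a b ha hb hab
          rw [pow_add]
          rcases Nat.lt_or_ge a 2 with hc | hc
          · have h2a : 2 ≤ 2 ^ a := by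
              calc 2 = 2 ^ 1 := rfl
                _ ≤ 2 ^ a := Nat.pow_le_pow_right (by norm_num) ha
            have h4b : 4 ≤ 2 ^ b := by
              calc 4 = 2 ^ 2 := rfl
                _ ≤ 2 ^ b := Nat.pow_le_pow_right (by norm_num) (by omega)
            nlinarith
          · have h2b : 2 ≤ 2 ^ b := by
              calc 2 = 2 ^ 1 := rfl
                _ ≤ 2 ^ b := Nat.pow_le_pow_right (by norm_num) hb
            have h4a : 4 ≤ 2 ^ a := by
              calc 4 = 2 ^ 2 := rfl
                _ ≤ 2 ^ a := Nat.pow_le_pow_right (by norm_num) hc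
            nlinarith
        have hlt := key (node.length / 2 / 2 + (node.length - node.length / 2) / 2)
          ((node.length / 2 - node.length / 2 / 2) +
            ((node.length - node.length / 2) - (node.length - node.length / 2) / 2))
          (by omega) (by omega) (by omega)
        have hsum : (node.length / 2 / 2 + (node.length - node.length / 2) / 2) +
            ((node.length / 2 - node.length / 2 / 2) +
              ((node.length - node.length / 2) - (node.length - node.length / 2) / 2))
            = node.length := by omega
        rw [hsum] at hlt
        rw [ih _ out (by simp only [List.map_cons, List.sum_cons]; rw [e1, e2]; omega)]
        simp only [List.map_cons, List.flatten_cons, alternar_split node h, List.append_assoc]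

theorem alternar_spec : Claim_equal_alternar := by
  intro arr _
  unfold Spec_alternar alternar_alt
  split
  · next h => exact alternar_small arr h
  · rw [altLoopF_inv _ [arr] [] (by simp)]
    simp

-- ===== VERDICT (by name: the statement is the Claim_ definition above) =====
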